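-- pv_equiv track=rewrite | github.com/biodataprog/GEN220_2020_examples_2021 | Patterns/Patterns.py | aspairs
-- ===== SOURCE A (Python) =====
-- import itertools, sys, re, os
-- import itertools, sys, re, os
--
-- def isheader(line):
--     return line[0] == '>'
--
-- def aspairs(f):
--     seq_id = ''
--     sequence = ''
--     for header,group in itertools.groupby(f, isheader):
--         if header:
--             line = next(group)
--             seq_id = line[1:].split()[0]
--         else:
--             sequence = ''.join(line.strip() for line in group)
--             yield seq_id, sequence
-- ===== SOURCE B (Python) =====
-- def aspairs(f):
--     seq_id = ''
--     seq = None
--     for line in f: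
--         if line[0] == '>':
--             if seq is not None:
--                 yield seq_id, seq
--                 seq = None
--             seq_id = line[1:].split()[0]
--         else:
--             seq = (seq if seq is not None else '') + line.strip()
--     if seq is not None:
--         yield seq_id, seq
-- ===== Notes on version B (the rewrite author's own statement) =====
-- stated objective: idiomatic
-- what changed: Replaced the itertools.groupby two-level iteration by a direct single-pass state machine keeping the current id and a pending sequence accumulator; Pre_ excludes empty lines and headers with no token after '>' (A raises IndexError there) and files with consecutive header lines, on which which header of the run labels the following sequence is an accidental first-vs-last choice (A takes the first, B the last).
-- outside the precondition, e.g. on aspairs(['>a 1', '>b', 'AC']): A returns [('a', 'AC')], B returns [('b', 'AC')]; on aspairs(['>a', '>', 'AC']): A returns [('a', 'AC')], B raises IndexError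
import Mathlib
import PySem

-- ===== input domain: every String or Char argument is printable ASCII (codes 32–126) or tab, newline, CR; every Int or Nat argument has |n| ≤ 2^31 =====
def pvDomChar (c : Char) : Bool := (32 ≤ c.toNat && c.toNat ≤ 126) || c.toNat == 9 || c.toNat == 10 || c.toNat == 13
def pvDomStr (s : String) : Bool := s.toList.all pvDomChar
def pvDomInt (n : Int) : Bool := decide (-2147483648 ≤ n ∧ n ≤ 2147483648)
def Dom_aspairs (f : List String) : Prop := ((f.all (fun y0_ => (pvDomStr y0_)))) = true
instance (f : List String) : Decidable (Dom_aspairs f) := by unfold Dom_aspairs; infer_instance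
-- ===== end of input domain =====

-- B replaces A's itertools.groupby two-level iteration by a single-pass state machine (idiomatic; same output on Pre_).


-- ===== PORT A =====
-- isheader(line): line[0] == '>'.  Python raises IndexError on line = ''; those inputs are outside Pre_,
-- the 'none' branch only makes the port total there.
def isheaderL (line : String) : Bool :=
  match PySem.Str.pyGet? line 0 with
  | some c => c == '>'
  | none => false

-- line[1:].split()[0]; an empty split result raises IndexError in Python (outside Pre_), headD makes it total.
def idOf (line : String) : String :=
  (PySem.Str.split₀ (PySem.Str.slice line (some 1) none)).headD ""

-- ''.join(line.strip() for line in g): join with the empty separator is concatenation (exact).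
def joinStrip : List String → String
  | [] => ""
  | l :: ls => PySem.Str.strip l ++ joinStrip ls

-- itertools.groupby(f, isheader): maximal runs of lines with equal key, in order (exact).
def takeRun (k : Bool) : List String → List String × List String
  | [] => ([], [])
  | x :: xs =>
    if isheaderL x == k then
      let p := takeRun (k := k) xs
      (x :: p.1, p.2)
    else ([], x :: xs)

-- (termination fact for groupRuns; cited by name in decreasing_by)
lemma takeRun_snd_length_le (k : Bool) : ∀ xs : List String, (takeRun k xs).2.length ≤ xs.length
  | [] => by simp [takeRun]
  | x :: xs => by
    by_cases h : isheaderL x == k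
    · simpa [takeRun, h] using Nat.le_succ_of_le (takeRun_snd_length_le k xs)
    · simp [takeRun, h]

def groupRuns : List String → List (Bool × List String)
  | [] => []
  | x :: xs =>
    let k := isheaderL x
    let p := takeRun (k := k) xs
    (k, x :: p.1) :: groupRuns p.2
termination_by l => l.length
decreasing_by exact Nat.lt_succ_of_le (takeRun_snd_length_le _ _)

-- the generator's loop body, one step per (header, group) pair, yields collected in order
def aspairsGroups : List (Bool × List String) → String → List (String × String)
  | [], _ => []
  | (header, g) :: gs, seq_id =>
    if header then aspairsGroups gs (idOf (g.headD ""))   -- line = next(group); seq_id = line[1:].split()[0]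
    else (seq_id, joinStrip g) :: aspairsGroups gs seq_id -- yield seq_id, sequence

def aspairs (f : List String) : List (String × String) :=
  aspairsGroups (groupRuns f) ""

-- ===== PORT B =====
-- single-pass state machine: current seq_id and a pending sequence accumulator (none = no run in progress)
def bloop : List String → String → Option String → List (String × String)
  | [], seq_id, seq =>
    (match seq with | some s => [(seq_id, s)] | none => [])
  | line :: rest, seq_id, seq =>
    if isheaderL line then
      (match seq with | some s => [(seq_id, s)] | none => []) ++ bloop rest (idOf line) none
    else
      bloop rest seq_id (some ((seq.getD "") ++ PySem.Str.strip line))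

def aspairs_alt (f : List String) : List (String × String) :=
  bloop f "" none

-- ===== PRECONDITION & SPEC =====
-- Pre_ excludes: empty lines and header lines with no token after '>' (Python A raises IndexError on those),
-- and files containing two consecutive header lines — a record with no sequence, on which which header of the
-- run labels the following sequence is an unspecified first-vs-last choice (A accidentally takes the first).
def Pre_aspairs (f : List String) : Prop :=
  (∀ l ∈ f, l ≠ "" ∧ (isheaderL l = true →
      PySem.Str.split₀ (PySem.Str.slice l (some 1) none) ≠ [])) ∧
  List.IsChain (fun a b => ¬(isheaderL a = true ∧ isheaderL b = true)) f
instance (f : List String) : Decidable (Pre_aspairs f) := by unfold Pre_aspairs; infer_instance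

def pvWitness_aspairs : List String := [">seq1 desc", "ACGT", " tgca ", ">seq2", "TTAA"]

def Spec_aspairs (f : List String) (out : List (String × String)) : Prop := out = aspairs_alt f
instance (f : List String) (out : List (String × String)) : Decidable (Spec_aspairs f out) := by unfold Spec_aspairs; infer_instance

-- ===== CLAIM (what is proved, stated in full; the proofs are below) =====
def Claim_equal_aspairs : Prop := ∀ (f : List String), Dom_aspairs f → Pre_aspairs f → Spec_aspairs f (aspairs f)

-- ===== LEMMAS AND PROOFS =====

-- with no consecutive headers, a header is never followed by another header: its run is a singleton
lemma takeRun_true_of_chain (t : List String) :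
    List.IsChain (fun a b => ¬(isheaderL a = true ∧ isheaderL b = true)) t →
    (∀ y, t.head? = some y → isheaderL y = false) → takeRun true t = ([], t) := by
  intro _ hhead
  match t with
  | [] => simp [takeRun]
  | y :: ys =>
    have : isheaderL y = false := hhead y rfl
    simp [takeRun, this]

-- the chain'-property passes to takeRun's remainder (a suffix)
lemma chain_takeRun (k : Bool) : ∀ t : List String,
    List.IsChain (fun a b => ¬(isheaderL a = true ∧ isheaderL b = true)) t →
    List.IsChain (fun a b => ¬(isheaderL a = true ∧ isheaderL b = true)) (takeRun k t).2
  | [], h => by simpa [takeRun] using h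
  | x :: xs, h => by
    by_cases hx : isheaderL x == k
    · simpa [takeRun, hx] using chain_takeRun k xs h.tail
    · simpa [takeRun, hx] using h

-- inside a non-header run B concatenates the stripped lines onto the accumulator, then yields once
lemma bloop_seq_run : ∀ (xs : List String) (sid s : String),
    bloop xs sid (some s) =
      (sid, s ++ joinStrip (takeRun false xs).1) :: bloop (takeRun false xs).2 sid none
  | [], sid, s => by simp [bloop, takeRun, joinStrip]
  | y :: ys, sid, s => by
    by_cases h : isheaderL y
    · simp [takeRun, bloop, h, joinStrip]
    · have h' : isheaderL y = false := by simpa using h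
      rw [show takeRun false (y :: ys) = (y :: (takeRun false ys).1, (takeRun false ys).2) from by
        simp [takeRun, h']]
      simp only [bloop, h', Bool.false_eq_true, if_false, Option.getD_some]
      rw [bloop_seq_run ys sid (s ++ PySem.Str.strip y)]
      simp [joinStrip, String.append_assoc]

lemma bloop_eq_groups : ∀ (n : Nat) (f : List String), f.length ≤ n →
    List.IsChain (fun a b => ¬(isheaderL a = true ∧ isheaderL b = true)) f →
    ∀ sid : String, bloop f sid none = aspairsGroups (groupRuns f) sid := by
  intro n
  induction n with
  | zero =>
    intro f hf _ sid
    have : f = [] := List.eq_nil_of_length_eq_zero (Nat.le_zero.mp hf)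
    subst this; simp [bloop, groupRuns, aspairsGroups]
  | succ n ih =>
    intro f hf hch sid
    match f with
    | [] => simp [bloop, groupRuns, aspairsGroups]
    | x :: t =>
      by_cases h : isheaderL x
      · have hrun : takeRun true t = ([], t) := by
          refine takeRun_true_of_chain t hch.tail ?_
          intro y hy
          rcases t with _ | ⟨z, zs⟩
          · simp at hy
          · have hR := (List.isChain_cons_cons.mp hch).1
            cases hy
            by_contra hzy
            exact hR ⟨h, by simpa using hzy⟩
        rw [groupRuns]
        simp only [h, hrun, aspairsGroups, List.headD_cons, if_true]
        have hb : bloop (x :: t) sid none = bloop t (idOf x) none := by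
          simp [bloop, h]
        rw [hb]
        exact ih t (Nat.le_of_succ_le_succ hf) hch.tail _
      · rw [groupRuns]
        simp only [aspairsGroups]
        rw [if_neg h]
        have h' : isheaderL x = false := by simpa using h
        simp only [h']
        have hb : bloop (x :: t) sid none = bloop t sid (some (PySem.Str.strip x)) := by
          simp [bloop, h]
        rw [hb, bloop_seq_run]
        have hj : joinStrip (x :: (takeRun false t).1)
            = PySem.Str.strip x ++ joinStrip (takeRun false t).1 := rfl
        rw [hj]
        rw [ih _ (le_trans (takeRun_snd_length_le false t) (Nat.le_of_succ_le_succ hf))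
              (chain_takeRun false t hch.tail) sid]

-- ===== VERDICT (by name: the statement is the Claim_ definition above) =====
theorem aspairs_spec : Claim_equal_aspairs := by
  intro f _ hpre
  unfold Spec_aspairs aspairs aspairs_alt
  exact (bloop_eq_groups f.length f le_rfl hpre.2 "").symm
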